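-- pv_equiv track=rewrite | github.com/InternLM/lmdeploy | autotest/interface/restful/reasoning_parser/conftest.py | _output_to_deltas
-- ===== SOURCE A (Python) =====
-- def _output_to_deltas(output, vocab):
--     """Split *output* into deltas at special-token boundaries.
--
--     Special tokens (keys of *vocab*) become individual deltas; all other text between them is collected into a single
--     delta.  Empty outputs produce an empty list.
--     """
--     deltas = []
--     i = 0
--     sorted_tokens = sorted(vocab.keys(), key=len, reverse=True)
--     current_chunk = ''
--     while i < len(output):
--         matched = False
--         for tok_str in sorted_tokens:
--             if output[i:i + len(tok_str)] == tok_str: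
--                 if current_chunk:
--                     deltas.append(current_chunk)
--                     current_chunk = ''
--                 deltas.append(tok_str)
--                 i += len(tok_str)
--                 matched = True
--                 break
--         if not matched:
--             current_chunk += output[i]
--             i += 1
--     if current_chunk:
--         deltas.append(current_chunk)
--     return deltas
-- ===== SOURCE B (Python) =====
-- def _output_to_deltas(output, vocab):
--     # Same splitting, different strategy: no sorting of the vocabulary; at each
--     # position scan the keys once keeping the longest match, and track the
--     # pending plain-text chunk by its start index (sliced out on demand)
--     # instead of accumulating it character by character.
--     deltas = []
--     n = len(output)
--     i = 0
--     chunk_start = 0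
--     while i < n:
--         best = None
--         for tok in vocab:
--             if (best is None or len(best) < len(tok)) and output.startswith(tok, i):
--                 best = tok
--         if best:
--             if chunk_start < i:
--                 deltas.append(output[chunk_start:i])
--             deltas.append(best)
--             i += len(best)
--             chunk_start = i
--         else:
--             i += 1
--     if chunk_start < n:
--         deltas.append(output[chunk_start:])
--     return deltas
-- ===== Notes on version B (the rewrite author's own statement) =====
-- stated objective: alternative
-- what changed: B drops A's sort of the vocabulary and its first-match scan over length-sorted tokens: at each position it takes the longest matching key in one unsorted pass (matches of equal length are the same string, so this is the same token), and it tracks the pending text chunk by its start index and slices it out, instead of growing a chunk string character by character.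
import Mathlib
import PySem

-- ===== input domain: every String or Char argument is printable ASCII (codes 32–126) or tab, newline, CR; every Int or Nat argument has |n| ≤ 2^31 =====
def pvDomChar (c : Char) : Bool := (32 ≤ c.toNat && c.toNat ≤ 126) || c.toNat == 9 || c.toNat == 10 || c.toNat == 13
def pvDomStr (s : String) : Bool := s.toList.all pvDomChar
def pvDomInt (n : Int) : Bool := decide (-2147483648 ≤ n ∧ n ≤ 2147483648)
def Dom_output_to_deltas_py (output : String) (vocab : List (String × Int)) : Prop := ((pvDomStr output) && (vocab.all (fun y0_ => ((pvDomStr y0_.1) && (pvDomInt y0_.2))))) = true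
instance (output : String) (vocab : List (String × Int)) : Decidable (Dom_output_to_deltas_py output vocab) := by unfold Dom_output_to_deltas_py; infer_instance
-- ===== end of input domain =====

-- B replaces A's sort + first-match scan by an unsorted longest-match scan and index-tracked
-- chunks; equivalence is proved on all inputs where A terminates (no empty vocab key unless
-- the output is empty).

-- ===== PORT A =====
-- inner 'for tok_str in sorted_tokens: … break' loop: returns the first token whose
-- slice comparison output[i:i+len(tok)] == tok succeeds (string == ported as toList equality)
def pvFindTok (cs : List Char) (i : Nat) : List String → Option String
  | [] => none
  | t :: rest =>
      if PySem.List.slice cs (some (i : Int)) (some ((i : Int) + PySem.Str.len t)) = t.toList then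
        some t
      else pvFindTok cs i rest

-- the 'while i < len(output)' loop; fuel only makes the recursion structural (A diverges on an
-- empty vocab key with nonempty output; Pre_ excludes that, and there fuel never runs out)
def pvLoopA (cs : List Char) (toks : List String) : Nat → Nat → List Char → List String → List String
  | 0, _, _, acc => acc
  | fuel + 1, i, chunk, acc =>
      if i < cs.length then
        match pvFindTok cs i toks with
        | some t =>
            pvLoopA cs toks fuel (i + t.toList.length) []
              ((if chunk = [] then acc else acc ++ [String.ofList chunk]) ++ [t])
        | none => pvLoopA cs toks fuel (i + 1) (chunk ++ [PySem.List.pyGetD cs (i : Int) ' ']) acc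
      else if chunk = [] then acc else acc ++ [String.ofList chunk]

def output_to_deltas_py (output : String) (vocab : List (String × Int)) : List String :=
  let cs := output.toList
  let sortedTokens := PySem.List.sorted (vocab.map Prod.fst) (fun s => PySem.Str.len s) true
  pvLoopA cs sortedTokens (cs.length + 1) 0 [] []

-- ===== PORT B =====
-- 'best = None; for tok in vocab: if (best is None or len(best) < len(tok)) and output.startswith(tok, i): best = tok'
-- (startswith(tok, i) with 0 ≤ i < len is exactly prefix-of-the-drop)
def pvBestTok (cs : List Char) (i : Nat) (vocab : List (String × Int)) : Option String :=
  vocab.foldl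
    (fun best kv =>
      if (match best with
          | none => true
          | some b => decide (b.toList.length < kv.1.toList.length)) &&
          kv.1.toList.isPrefixOf (cs.drop i) then some kv.1 else best)
    none

def pvLoopB (cs : List Char) (vocab : List (String × Int)) : Nat → Nat → Nat → List String → List String
  | 0, _, _, acc => acc
  | fuel + 1, i, cStart, acc =>
      if i < cs.length then
        match pvBestTok cs i vocab with
        | some t =>
            if t.toList = [] then pvLoopB cs vocab fuel (i + 1) cStart acc   -- 'if best:' — '' is falsy
            else
              pvLoopB cs vocab fuel (i + t.toList.length) (i + t.toList.length)
                ((if cStart < i then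
                    acc ++ [String.ofList (PySem.List.slice cs (some (cStart : Int)) (some (i : Int)))]
                  else acc) ++ [t])
        | none => pvLoopB cs vocab fuel (i + 1) cStart acc
      else if cStart < cs.length then
        acc ++ [String.ofList (PySem.List.slice cs (some (cStart : Int)) none)]
      else acc

def output_to_deltas_py_alt (output : String) (vocab : List (String × Int)) : List String :=
  let cs := output.toList
  pvLoopB cs vocab (cs.length + 1) 0 0 []

-- ===== PRECONDITION & SPEC =====
-- Pre_ excludes exactly the inputs on which A never returns: a nonempty output together with an
-- empty-string vocabulary key makes A's while loop match '' forever without advancing i.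
def Pre_output_to_deltas_py (output : String) (vocab : List (String × Int)) : Prop :=
  output.toList.length = 0 ∨ ∀ kv ∈ vocab, kv.1.toList.length ≠ 0
instance (output : String) (vocab : List (String × Int)) : Decidable (Pre_output_to_deltas_py output vocab) := by unfold Pre_output_to_deltas_py; infer_instance

def pvWitness_output_to_deltas_py : String × (List (String × Int)) :=
  ("a<t>b", [("<t>", 7), ("<", 1)])

def Spec_output_to_deltas_py (output : String) (vocab : List (String × Int)) (out : List String) : Prop := out = output_to_deltas_py_alt output vocab
instance (output : String) (vocab : List (String × Int)) (out : List String) : Decidable (Spec_output_to_deltas_py output vocab out) := by unfold Spec_output_to_deltas_py; infer_instance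

-- ===== CLAIM (what is proved, stated in full; the proofs are below) =====
def Claim_equal_output_to_deltas_py : Prop := ∀ (output : String) (vocab : List (String × Int)), Dom_output_to_deltas_py output vocab → Pre_output_to_deltas_py output vocab → Spec_output_to_deltas_py output vocab (output_to_deltas_py output vocab)

-- ===== LEMMAS AND PROOFS =====

-- A's slice-comparison test is the prefix test B uses
theorem pvMatch_iff (cs : List Char) (i : Nat) (t : String) :
    (PySem.List.slice cs (some (i : Int)) (some ((i : Int) + PySem.Str.len t)) = t.toList) ↔
      t.toList <+: cs.drop i := by
  rw [PySem.Str.len_eq]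
  rw [show ((i : Int) + (t.toList.length : Int)) = ((i + t.toList.length : Nat) : Int) by push_cast; ring]
  rw [show ((i + t.toList.length : Nat) : Int) = ((i : Int) + (t.toList.length : Int)) by push_cast; ring,
    PySem.List.slice_natCast_add, List.prefix_iff_eq_take]
  constructor <;> intro h <;> exact h.symm

theorem pvFindTok_none (cs : List Char) (i : Nat) (l : List String) :
    pvFindTok cs i l = none ↔ ∀ t ∈ l, ¬ (t.toList <+: cs.drop i) := by
  induction l with
  | nil => simp [pvFindTok]
  | cons a l ih =>
      simp only [pvFindTok, pvMatch_iff]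
      by_cases h : a.toList <+: cs.drop i
      · simp [h]
      · simp [h, ih]

theorem pvFindTok_some (cs : List Char) (i : Nat) (l : List String) (t : String)
    (h : pvFindTok cs i l = some t) : t ∈ l ∧ t.toList <+: cs.drop i := by
  induction l with
  | nil => simp [pvFindTok] at h
  | cons a l ih =>
      rw [pvFindTok] at h
      split at h
      next hm =>
        obtain rfl : a = t := Option.some.inj h
        exact ⟨List.mem_cons_self, (pvMatch_iff cs i a).1 hm⟩
      next hm =>
        obtain ⟨h1, h2⟩ := ih h
        exact ⟨List.mem_cons_of_mem _ h1, h2⟩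

theorem pvFindTok_max (cs : List Char) (i : Nat) (l : List String) (t : String)
    (hp : l.Pairwise (fun a b => PySem.Str.len b ≤ PySem.Str.len a))
    (h : pvFindTok cs i l = some t) :
    ∀ u ∈ l, u.toList <+: cs.drop i → u.toList.length ≤ t.toList.length := by
  induction l with
  | nil => simp [pvFindTok] at h
  | cons a l ih =>
      rw [pvFindTok] at h
      rcases List.pairwise_cons.1 hp with ⟨ha, hp'⟩
      split at h
      next hm =>
        obtain rfl : a = t := Option.some.inj h
        intro u hu _
        rcases List.mem_cons.1 hu with hu | hu
        · simp [hu]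
        · have := ha u hu
          simp only [PySem.Str.len_eq] at this
          exact_mod_cast this
      next hm =>
        intro u hu hmu
        rcases List.mem_cons.1 hu with hu | hu
        · exact absurd ((pvMatch_iff cs i u).2 (hu ▸ hmu)) (by subst hu; exact fun c => hm c)
        · exact ih hp' h u hu hmu

-- the B-side fold step
def pvStep (cs : List Char) (i : Nat) (best : Option String) (kv : String × Int) : Option String :=
  if (match best with
      | none => true
      | some b => decide (b.toList.length < kv.1.toList.length)) &&
      kv.1.toList.isPrefixOf (cs.drop i) then some kv.1 else best

theorem pvBestTok_eq_foldl (cs : List Char) (i : Nat) (vocab : List (String × Int)) :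
    pvBestTok cs i vocab = vocab.foldl (pvStep cs i) none := rfl

theorem pvStep_some (cs : List Char) (i : Nat) (b0 : String) (kv : String × Int) :
    pvStep cs i (some b0) kv =
      if (decide (b0.toList.length < kv.1.toList.length) && kv.1.toList.isPrefixOf (cs.drop i)) = true
      then some kv.1 else some b0 := rfl

theorem pvStep_none (cs : List Char) (i : Nat) (kv : String × Int) :
    pvStep cs i none kv =
      if kv.1.toList.isPrefixOf (cs.drop i) = true then some kv.1 else none := rfl

theorem pvFold_mono (cs : List Char) (i : Nat) (l : List (String × Int)) (b0 : String) :
    ∃ b, l.foldl (pvStep cs i) (some b0) = some b ∧ b0.toList.length ≤ b.toList.length := by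
  induction l generalizing b0 with
  | nil => exact ⟨b0, rfl, le_refl _⟩
  | cons kv l ih =>
      rw [List.foldl_cons, pvStep_some]
      by_cases h : (decide (b0.toList.length < kv.1.toList.length) && kv.1.toList.isPrefixOf (cs.drop i)) = true
      · rw [if_pos h]
        simp only [Bool.and_eq_true, decide_eq_true_eq] at h
        obtain ⟨b, hb, hlen⟩ := ih kv.1
        exact ⟨b, hb, le_trans (le_of_lt h.1) hlen⟩
      · rw [if_neg h]
        exact ih b0

theorem pvFold_good (cs : List Char) (i : Nat) (l : List (String × Int)) (acc : Option String)
    (hacc : ∀ x, acc = some x → x.toList <+: cs.drop i) :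
    ∀ x, l.foldl (pvStep cs i) acc = some x →
      x.toList <+: cs.drop i ∧ (acc = some x ∨ x ∈ l.map Prod.fst) := by
  induction l generalizing acc with
  | nil => exact fun x hx => ⟨hacc x hx, Or.inl hx⟩
  | cons kv l ih =>
      intro x hx
      rw [List.foldl_cons] at hx
      have hstep : ∀ y, pvStep cs i acc kv = some y → y.toList <+: cs.drop i ∧ (acc = some y ∨ y = kv.1) := by
        intro y hy
        cases hacc' : acc with
        | none =>
            rw [hacc', pvStep_none] at hy
            split at hy
            next h =>
              obtain rfl : kv.1 = y := Option.some.inj hy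
              exact ⟨List.isPrefixOf_iff_prefix.1 h, Or.inr rfl⟩
            next h => exact absurd hy (by simp)
        | some b0 =>
            rw [hacc', pvStep_some] at hy
            split at hy
            next h =>
              simp only [Bool.and_eq_true] at h
              obtain rfl : kv.1 = y := Option.some.inj hy
              exact ⟨List.isPrefixOf_iff_prefix.1 h.2, Or.inr rfl⟩
            next h => exact ⟨hacc y (hacc' ▸ hy), Or.inl (hacc' ▸ hy)⟩
      obtain ⟨hm, hmem⟩ := ih (pvStep cs i acc kv) (fun y hy => (hstep y hy).1) x hx
      refine ⟨hm, ?_⟩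
      rcases hmem with hx' | hx'
      · rcases (hstep x hx').2 with h | h
        · exact Or.inl h
        · exact Or.inr (by simp [h])
      · exact Or.inr (by simp [hx'])

theorem pvFold_max (cs : List Char) (i : Nat) (l : List (String × Int)) (acc : Option String) :
    ∀ u ∈ l.map Prod.fst, u.toList <+: cs.drop i →
      ∃ b, l.foldl (pvStep cs i) acc = some b ∧ u.toList.length ≤ b.toList.length := by
  induction l generalizing acc with
  | nil => simp
  | cons kv l ih =>
      intro u hu hum
      rw [List.foldl_cons]
      rw [List.map_cons, List.mem_cons] at hu
      rcases hu with rfl | hu'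
      · have : ∃ c, pvStep cs i acc kv = some c ∧ kv.1.toList.length ≤ c.toList.length := by
          cases acc with
          | none =>
              rw [pvStep_none, if_pos (List.isPrefixOf_iff_prefix.2 hum)]
              exact ⟨kv.1, rfl, le_refl _⟩
          | some b0 =>
              rw [pvStep_some]
              by_cases hlt : b0.toList.length < kv.1.toList.length
              · rw [if_pos (by
                  simp only [Bool.and_eq_true, decide_eq_true_eq]
                  exact ⟨hlt, List.isPrefixOf_iff_prefix.2 hum⟩)]
                exact ⟨kv.1, rfl, le_refl _⟩
              · rw [if_neg (by
                  simp only [Bool.and_eq_true, decide_eq_true_eq, not_and]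
                  exact fun hc _ => hlt hc)]
                exact ⟨b0, rfl, le_of_not_gt hlt⟩
        obtain ⟨c, hc, hlen⟩ := this
        rw [hc]
        obtain ⟨b, hb, hlen2⟩ := pvFold_mono cs i l c
        exact ⟨b, hb, le_trans hlen hlen2⟩
      · exact ih (pvStep cs i acc kv) u hu' hum

-- equal-length matches at the same position are the same string
theorem pvMatch_unique (cs : List Char) (i : Nat) (t u : String)
    (ht : t.toList <+: cs.drop i) (hu : u.toList <+: cs.drop i)
    (hlen : t.toList.length = u.toList.length) : t = u := by
  rw [List.prefix_iff_eq_take] at ht hu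
  have : t.toList = u.toList := by rw [ht, hu, hlen]
  exact String.toList_injective this

-- the two inner scans agree: A's first match over the length-sorted keys is B's longest match
theorem pvFind_eq_best (cs : List Char) (i : Nat) (vocab : List (String × Int)) :
    pvFindTok cs i (PySem.List.sorted (vocab.map Prod.fst) (fun s => PySem.Str.len s) true) =
      pvBestTok cs i vocab := by
  have hmem : ∀ u : String,
      u ∈ PySem.List.sorted (vocab.map Prod.fst) (fun s => PySem.Str.len s) true ↔
        u ∈ vocab.map Prod.fst := fun u => PySem.List.mem_sorted _ _ _ u
  have hpw := PySem.List.sorted_pairwise_rev (vocab.map Prod.fst) (fun s => PySem.Str.len s)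
  rw [pvBestTok_eq_foldl]
  cases hA : pvFindTok cs i (PySem.List.sorted (vocab.map Prod.fst) (fun s => PySem.Str.len s) true) with
  | none =>
      have hnone := (pvFindTok_none cs i _).1 hA
      cases hB : vocab.foldl (pvStep cs i) none with
      | none => rfl
      | some b =>
          obtain ⟨hbm, hbmem⟩ := pvFold_good cs i vocab none (fun x hx => nomatch hx) b hB
          rcases hbmem with h | h
          · exact nomatch h
          · exact absurd hbm (hnone b ((hmem b).2 h))
  | some t =>
      obtain ⟨htmem, htm⟩ := pvFindTok_some cs i _ t hA
      have htmax := pvFindTok_max cs i _ t hpw hA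
      obtain ⟨b, hb, hlen1⟩ := pvFold_max cs i vocab none t ((hmem t).1 htmem) htm
      obtain ⟨hbm, hbmem⟩ := pvFold_good cs i vocab none (fun x hx => nomatch hx) b hb
      rcases hbmem with h | h
      · exact nomatch h
      · have hlen2 := htmax b ((hmem b).2 h) hbm
        rw [hb, pvMatch_unique cs i b t hbm htm (le_antisymm hlen2 hlen1)]

-- the matched token never runs past the end
theorem pvMatch_le (cs : List Char) (i : Nat) (t : String) (h : t.toList <+: cs.drop i) :
    i + t.toList.length ≤ cs.length ∨ cs.length ≤ i := by
  have h2 : t.toList.length ≤ (cs.drop i).length := h.length_le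
  rw [List.length_drop] at h2
  omega

-- main loop equivalence
theorem pvLoop_eq (output : String) (vocab : List (String × Int))
    (hne : ∀ kv ∈ vocab, kv.1.toList.length ≠ 0) :
    ∀ (fuel i cStart : Nat) (acc : List String),
      cStart ≤ i → i ≤ output.toList.length → output.toList.length - i < fuel →
      pvLoopA output.toList (PySem.List.sorted (vocab.map Prod.fst) (fun s => PySem.Str.len s) true)
          fuel i ((output.toList.drop cStart).take (i - cStart)) acc =
        pvLoopB output.toList vocab fuel i cStart acc := by
  intro fuel
  induction fuel with
  | zero => intro i cStart acc _ _ h3; omega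
  | succ fuel ih =>
      intro i cStart acc h1 h2 h3
      rw [pvLoopA, pvLoopB]
      by_cases hi : i < output.toList.length
      · rw [if_pos hi, if_pos hi, pvFind_eq_best]
        cases hb : pvBestTok output.toList i vocab with
        | none =>
            dsimp only
            have hchunk : (output.toList.drop cStart).take (i + 1 - cStart) =
                (output.toList.drop cStart).take (i - cStart) ++ [PySem.List.pyGetD output.toList (i : Int) ' '] := by
              rw [show i + 1 - cStart = (i - cStart) + 1 by omega, List.take_add_one]
              rw [List.getElem?_drop, show cStart + (i - cStart) = i by omega]
              rw [List.getElem?_eq_getElem hi]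
              rw [PySem.List.pyGetD_natCast, List.getD_eq_getElem _ _ hi]
              rfl
            rw [← hchunk]
            exact ih (i + 1) cStart acc (by omega) (by omega) (by omega)
        | some t =>
            dsimp only
            obtain ⟨htm, htmem⟩ := pvFold_good output.toList i vocab none (fun x hx => nomatch hx) t
              (by rw [← pvBestTok_eq_foldl]; exact hb)
            rcases htmem with h | htmem
            · exact nomatch h
            have htlne : ¬ t.toList = [] := by
              obtain ⟨kv, hkv, hkv2⟩ := List.mem_map.1 htmem
              intro hc
              exact hne kv hkv (by rw [hkv2, hc]; rfl)
            rw [if_neg htlne]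
            have hle : i + t.toList.length ≤ output.toList.length := by
              rcases pvMatch_le output.toList i t htm with h | h
              · exact h
              · omega
            have htpos : 0 < t.toList.length := List.length_pos_iff.2 htlne
            have hrec := ih (i + t.toList.length) (i + t.toList.length)
              ((if cStart < i then
                  acc ++ [String.ofList (PySem.List.slice output.toList (some (cStart : Int)) (some (i : Int)))]
                else acc) ++ [t]) (le_refl _) hle (by omega)
            rw [Nat.sub_self, List.take_zero] at hrec
            have haccs : (if (output.toList.drop cStart).take (i - cStart) = [] then acc
                else acc ++ [String.ofList ((output.toList.drop cStart).take (i - cStart))]) ++ [t] =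
                (if cStart < i then
                  acc ++ [String.ofList (PySem.List.slice output.toList (some (cStart : Int)) (some (i : Int)))]
                else acc) ++ [t] := by
              rw [PySem.List.slice_natCast]
              by_cases hci : cStart < i
              · rw [if_pos hci, if_neg (by
                  intro hc
                  have hlen := congrArg List.length hc
                  rw [List.length_take, List.length_drop, List.length_nil] at hlen
                  omega)]
              · rw [if_neg hci, if_pos (by
                  rw [show i - cStart = 0 by omega, List.take_zero])]
            rw [haccs]
            exact hrec
      · rw [if_neg hi, if_neg hi]
        have hieq : i = output.toList.length := by omega
        have hchunk : (output.toList.drop cStart).take (i - cStart) = output.toList.drop cStart := by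
          apply List.take_of_length_le
          rw [List.length_drop]; omega
        rw [hchunk, PySem.List.slice_from_natCast]
        by_cases hcs : cStart < output.toList.length
        · rw [if_pos hcs, if_neg (by
            intro hc
            exact absurd (List.drop_eq_nil_iff.1 hc) (by omega))]
        · rw [if_neg hcs, if_pos (List.drop_eq_nil_of_le (by omega))]

-- ===== VERDICT (by name: the statement is the Claim_ definition above) =====
theorem output_to_deltas_py_spec : Claim_equal_output_to_deltas_py := by
  intro output vocab _ hpre
  unfold Spec_output_to_deltas_py
  show output_to_deltas_py output vocab = output_to_deltas_py_alt output vocab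
  rcases hpre with hout | hne
  · have hnil : output.toList = [] := List.eq_nil_of_length_eq_zero hout
    simp [output_to_deltas_py, output_to_deltas_py_alt, hnil, pvLoopA, pvLoopB]
  · have := pvLoop_eq output vocab hne (output.toList.length + 1) 0 0 []
      (le_refl 0) (by omega) (by omega)
    rw [Nat.sub_self, List.take_zero] at this
    exact this
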